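-- pv_equiv track=rewrite | github.com/JonathanBarsoum/Fully-hacks-2026 | websEvent.py | _normalize_subreddits
-- ===== SOURCE A (Python) =====
-- from typing import Any, Dict, Iterable, List, Optional, Sequence, Tuple
--
-- def _normalize_subreddits(subreddits: Sequence[str]) -> List[str]:
--     normalized: List[str] = []
--     seen: set[str] = set()
--     aliases = {
--         "oc": "orangecounty",
--         "sf": "sanfrancisco",
--         "calforna": "california",
--     }
--     for raw in subreddits:
--         s = (raw or "").strip()
--         if not s:
--             continue
--         s = s[2:] if s.lower().startswith("r/") else s
--         s = s.lower()
--         s = aliases.get(s, s)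
--         if s in seen:
--             continue
--         seen.add(s)
--         normalized.append(s)
--     return normalized
-- ===== SOURCE B (Python) =====
-- def _normalize_subreddits(subreddits):
--     aliases = {
--         "oc": "orangecounty",
--         "sf": "sanfrancisco",
--         "calforna": "california",
--     }
--     cleaned = []
--     for raw in subreddits:
--         s = (raw or "").strip()
--         if s:
--             if s.lower().startswith("r/"):
--                 s = s[2:]
--             s = s.lower()
--             cleaned.append(aliases.get(s, s))
--     # Selection-style dedup: repeatedly take the head and filter out every
--     # later copy of it; no seen-set is ever maintained.
--     out = []
--     while cleaned:
--         head = cleaned[0]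
--         out.append(head)
--         cleaned = [x for x in cleaned[1:] if x != head]
--     return out
-- ===== Notes on version B (the rewrite author's own statement) =====
-- stated objective: alternative
-- what changed: Dedup by a selection-style shrinking-list algorithm (take the head, filter out all of its later copies, repeat) with no seen-set at all, after a separate normalization pass.
import Mathlib
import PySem

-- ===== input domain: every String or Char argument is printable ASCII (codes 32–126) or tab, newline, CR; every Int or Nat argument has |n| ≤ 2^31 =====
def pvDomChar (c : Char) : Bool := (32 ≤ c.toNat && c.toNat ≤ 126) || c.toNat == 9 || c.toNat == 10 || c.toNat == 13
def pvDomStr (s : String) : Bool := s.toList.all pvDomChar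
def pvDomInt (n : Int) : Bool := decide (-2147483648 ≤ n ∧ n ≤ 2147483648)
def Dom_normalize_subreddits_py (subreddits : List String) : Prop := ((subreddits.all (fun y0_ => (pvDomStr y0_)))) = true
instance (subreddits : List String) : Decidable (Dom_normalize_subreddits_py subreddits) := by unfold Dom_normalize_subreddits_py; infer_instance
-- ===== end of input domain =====

-- B separates normalization from dedup and dedups by a selection-style shrinking-list
-- algorithm (take the head, filter out its later copies) instead of A's fused seen-set loop.


-- ===== PORT A =====
-- Port of A: one fused loop (body pvBodyA) carrying (normalized, seen) state.
def pvAliasesA : PySem.Dict String String :=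
  PySem.Dict.ofList [("oc", "orangecounty"), ("sf", "sanfrancisco"), ("calforna", "california")]

def pvBodyA (st : List String × PySem.Set String) (raw : String) : List String × PySem.Set String :=
  let s := PySem.Str.strip (if raw == "" then "" else raw)
  if s == "" then st
  else
    let s1 := if PySem.Str.startswith (PySem.Str.lower s) "r/" then PySem.Str.slice s (some 2) none else s
    let s2 := PySem.Str.lower s1
    let s3 := PySem.Dict.getD pvAliasesA s2 s2
    if PySem.Set.contains st.2 s3 then st
    else (st.1 ++ [s3], PySem.Set.add st.2 s3)

def normalize_subreddits_py (subreddits : List String) : List String :=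
  (subreddits.foldl pvBodyA ([], PySem.Set.empty)).1

-- ===== PORT B =====
def pvAliasesB : PySem.Dict String String :=
  PySem.Dict.ofList [("oc", "orangecounty"), ("sf", "sanfrancisco"), ("calforna", "california")]

-- B's first pass: normalize each name, dropping empties (the 'for raw in subreddits' loop).
def pvCleanB (acc : List String) (raw : String) : List String :=
  let s := PySem.Str.strip (if raw == "" then "" else raw)
  if s == "" then acc
  else
    let s1 := if PySem.Str.startswith (PySem.Str.lower s) "r/" then PySem.Str.slice s (some 2) none else s
    let s2 := PySem.Str.lower s1
    acc ++ [PySem.Dict.getD pvAliasesB s2 s2]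

-- B's second pass: the 'while cleaned' selection dedup — emit the head, filter out its copies.
def pvDedupB : List String → List String
  | [] => []
  | head :: rest => head :: pvDedupB (rest.filter (fun x => x ≠ head))
termination_by xs => xs.length
decreasing_by
  simp only [List.length_unattach]
  exact Nat.lt_succ_of_le (le_trans (List.length_filter_le _ _) (by simp))

def normalize_subreddits_py_alt (subreddits : List String) : List String :=
  pvDedupB (subreddits.foldl pvCleanB [])

-- ===== PRECONDITION & SPEC =====
def Spec_normalize_subreddits_py (subreddits : List String) (out : List String) : Prop := out = normalize_subreddits_py_alt subreddits
instance (subreddits : List String) (out : List String) : Decidable (Spec_normalize_subreddits_py subreddits out) := by unfold Spec_normalize_subreddits_py; infer_instance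

-- ===== CLAIM (what is proved, stated in full; the proofs are below) =====
def Claim_equal_normalize_subreddits_py : Prop := ∀ (subreddits : List String), Dom_normalize_subreddits_py subreddits → Spec_normalize_subreddits_py subreddits (normalize_subreddits_py subreddits)

-- ===== LEMMAS AND PROOFS =====

-- the one-name normalization both ports compute (A inline, B inside pvCleanB)
def pvNormOne (raw : String) : Option String :=
  let s := PySem.Str.strip (if raw == "" then "" else raw)
  if s == "" then none
  else
    let s1 := if PySem.Str.startswith (PySem.Str.lower s) "r/" then PySem.Str.slice s (some 2) none else s
    let s2 := PySem.Str.lower s1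
    some (PySem.Dict.getD pvAliasesB s2 s2)

-- A's loop body, applied to a diagonal state (acc, acc), is Set.add along pvNormOne.
theorem pv_body_diag (acc : PySem.Set String) (raw : String) :
    pvBodyA (acc, acc) raw
      = (match pvNormOne raw with
         | none => (acc, acc)
         | some v => (PySem.Set.add acc v, PySem.Set.add acc v)) := by
  unfold pvBodyA pvNormOne PySem.Set.add
  simp only [pvAliasesA, pvAliasesB]
  split_ifs <;> simp_all

-- A's fused loop, from a diagonal state, computes foldl Set.add over the normalized names.
theorem pv_loop_diag (xs : List String) (acc : PySem.Set String) :
    xs.foldl pvBodyA (acc, acc)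
      = ((xs.filterMap pvNormOne).foldl PySem.Set.add acc,
         (xs.filterMap pvNormOne).foldl PySem.Set.add acc) := by
  induction xs generalizing acc with
  | nil => rfl
  | cons x xs ih =>
    rw [List.foldl_cons, pv_body_diag]
    cases h : pvNormOne x with
    | none => simp [h, ih acc]
    | some v => simp [h, ih (PySem.Set.add acc v)]

-- B's normalization pass collects exactly the filterMap of pvNormOne.
theorem pv_clean_eq (xs : List String) (acc : List String) :
    xs.foldl pvCleanB acc = acc ++ xs.filterMap pvNormOne := by
  induction xs generalizing acc with
  | nil => simp
  | cons x xs ih =>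
    rw [List.foldl_cons]
    cases h : pvNormOne x with
    | none =>
      have : pvCleanB acc x = acc := by
        unfold pvCleanB; unfold pvNormOne at h; split_ifs at h ⊢ <;> simp_all
      simp [this, ih, h]
    | some v =>
      have : pvCleanB acc x = acc ++ [v] := by
        unfold pvCleanB; unfold pvNormOne at h; split_ifs at h ⊢ <;> simp_all
      simp [this, ih, h]

-- unfolding equations for pvDedupB
theorem pvDedupB_nil : pvDedupB [] = [] := by rw [pvDedupB.eq_def]

theorem pvDedupB_cons (x : String) (rest : List String) :
    pvDedupB (x :: rest) = x :: pvDedupB (rest.filter (fun y => y ≠ x)) := by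
  rw [pvDedupB.eq_def]

-- Seen-set fold vs selection dedup: the fold from 'seen' outputs 'seen' followed by the
-- selection dedup of the names not already seen.
theorem pv_fold_eq_dedup (xs : List String) (seen : List String) :
    xs.foldl PySem.Set.add seen
      = seen ++ pvDedupB (xs.filter (fun y => !(seen.contains y))) := by
  induction xs generalizing seen with
  | nil => simp [pvDedupB_nil]
  | cons x xs ih =>
    rw [List.foldl_cons]
    by_cases hx : x ∈ seen
    · have hadd : PySem.Set.add seen x = seen := by
        simp [PySem.Set.add, PySem.Set.contains, hx]
      rw [hadd, ih seen, List.filter_cons]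
      simp [hx]
    · have hadd : PySem.Set.add seen x = seen ++ [x] := by
        simp [PySem.Set.add, PySem.Set.contains, hx]
      rw [hadd, ih (seen ++ [x]), List.filter_cons]
      have hfil : xs.filter (fun y => !((seen ++ [x]).contains y))
          = (xs.filter (fun y => !(seen.contains y))).filter (fun y => y ≠ x) := by
        rw [List.filter_filter]
        apply List.filter_congr
        intro a _
        simp [eq_comm, Bool.and_comm]
      rw [hfil, List.append_assoc]
      simp [pvDedupB_cons, hx]

-- ===== VERDICT (by name: the statement is the Claim_ definition above) =====
theorem normalize_subreddits_py_spec : Claim_equal_normalize_subreddits_py := by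
  intro subreddits _
  show normalize_subreddits_py subreddits = normalize_subreddits_py_alt subreddits
  unfold normalize_subreddits_py normalize_subreddits_py_alt
  rw [show (PySem.Set.empty : PySem.Set String) = ([] : List String) from rfl]
  rw [pv_loop_diag, pv_clean_eq]
  simpa using pv_fold_eq_dedup (subreddits.filterMap pvNormOne) []
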